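-- pv_equiv track=rewrite | github.com/yoojinjangjang/Algorithm_GanSul | 조우형/DFS_BFS/Q18.py | check_pair
-- ===== SOURCE A (Python) =====
-- def check_pair(u):
--
--     left = 0
--     right = 0
--     for i in u:
--         if i == '(':
--             left += 1
--
--         elif left >= 1 and i == ')':
--             right += 1
--
--         else:
--             return False
--
--     return True
-- ===== SOURCE B (Python) =====
-- def check_pair(u):
--     return all(c in '()' for c in u) and (not u or u[0] == '(')
-- ===== Notes on version B (the rewrite author's own statement) =====
-- stated objective: simpler
-- what changed: Replaces A's stateful left/right counter loop with two independent stateless checks: every character is a parenthesis, and the string is empty or starts with '('.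
import Mathlib
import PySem

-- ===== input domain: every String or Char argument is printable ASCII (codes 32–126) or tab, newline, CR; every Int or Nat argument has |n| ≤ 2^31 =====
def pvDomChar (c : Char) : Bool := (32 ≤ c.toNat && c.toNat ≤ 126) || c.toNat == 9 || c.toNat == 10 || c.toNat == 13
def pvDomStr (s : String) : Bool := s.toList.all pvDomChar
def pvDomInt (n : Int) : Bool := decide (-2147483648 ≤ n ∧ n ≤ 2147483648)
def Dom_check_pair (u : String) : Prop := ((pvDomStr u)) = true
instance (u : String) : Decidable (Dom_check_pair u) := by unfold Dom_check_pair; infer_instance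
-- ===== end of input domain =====

-- B replaces A's stateful left/right counter loop with two stateless checks (all-parens and first-char); objective: simpler.


-- ===== PORT A =====
-- loop over the characters carrying the (left, right) counters, branches in A's order
def check_pairLoop (l : List Char) (left right : Int) : Bool :=
  match l with
  | [] => true
  | i :: rest =>
    if i = '(' then check_pairLoop rest (left + 1) right
    else if 1 ≤ left ∧ i = ')' then check_pairLoop rest left (right + 1)
    else false

def check_pair (u : String) : Bool := check_pairLoop u.toList 0 0

-- ===== PORT B =====
def check_pair_alt (u : String) : Bool :=
  u.toList.all (fun c => c == '(' || c == ')') &&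
    (u.toList.isEmpty || (u.toList.headD ' ' = '('))

-- ===== PRECONDITION & SPEC =====
def Spec_check_pair (u : String) (out : Bool) : Prop := out = check_pair_alt u
instance (u : String) (out : Bool) : Decidable (Spec_check_pair u out) := by unfold Spec_check_pair; infer_instance

-- ===== CLAIM (what is proved, stated in full; the proofs are below) =====
def Claim_equal_check_pair : Prop := ∀ (u : String), Dom_check_pair u → Spec_check_pair u (check_pair u)

-- ===== LEMMAS AND PROOFS =====

-- once left ≥ 1, A's loop just checks that every remaining char is a parenthesis
theorem check_pairLoop_pos (l : List Char) (left right : Int) (h : 1 ≤ left) :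
    check_pairLoop l left right = l.all (fun c => c == '(' || c == ')') := by
  induction l generalizing left right with
  | nil => rfl
  | cons i rest ih =>
    simp only [check_pairLoop, List.all_cons]
    by_cases hp : i = '('
    · rw [if_pos hp, ih (left + 1) right (by omega), hp]
      simp
    · by_cases hq : i = ')'
      · rw [if_neg hp, if_pos ⟨h, hq⟩, ih left (right + 1) h, hq]
        simp
      · simp [hp, hq]

-- ===== VERDICT (by name: the statement is the Claim_ definition above) =====
theorem check_pair_spec : Claim_equal_check_pair := by
  intro u _
  unfold Spec_check_pair check_pair check_pair_alt
  cases hl : u.toList with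
  | nil => rfl
  | cons c rest =>
    simp only [check_pairLoop, List.isEmpty_cons, List.headD_cons, List.all_cons]
    by_cases hp : c = '('
    · simp [hp, check_pairLoop_pos rest 1 0 le_rfl]
    · have h0 : ¬ (1 ≤ (0:Int) ∧ c = ')') := fun h => absurd h.1 (by omega)
      simp [hp, h0]
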